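-- pv_equiv track=rewrite | github.com/tjklint/HoneyGuard | src/services/dictionary_attack_service.py | is_fuzzy_match
-- ===== SOURCE A (Python) =====
-- def is_fuzzy_match(password, word):
--     # Check for case-insensitive match or leet substitutions
--     password = password.lower()
--     word = word.lower()
--
--     # Replace common leet speak substitutions
--     leet_subs = {
--         "4": "a", "@": "a", "$": "s", "5": "s", "0": "o", "1": "l", "!": "i", "3": "e"
--     }
--     for leet, char in leet_subs.items():
--         password = password.replace(leet, char)
--
--     # Check if transformed password matches the word
--     return password == word
-- ===== SOURCE B (Python) =====
-- def is_fuzzy_match(password, word):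
--     # One pass: map each character through the leet table (default: itself).
--     leet_subs = {
--         "4": "a", "@": "a", "$": "s", "5": "s", "0": "o", "1": "l", "!": "i", "3": "e"
--     }
--     return "".join(leet_subs.get(c, c) for c in password.lower()) == word.lower()
-- ===== Notes on version B (the rewrite author's own statement) =====
-- stated objective: idiomatic
-- what changed: Replaces A's eight sequential full-string .replace passes with a single character-by-character pass that maps each character through the leet dict (defaulting to itself) and joins the result.
import Mathlib
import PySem

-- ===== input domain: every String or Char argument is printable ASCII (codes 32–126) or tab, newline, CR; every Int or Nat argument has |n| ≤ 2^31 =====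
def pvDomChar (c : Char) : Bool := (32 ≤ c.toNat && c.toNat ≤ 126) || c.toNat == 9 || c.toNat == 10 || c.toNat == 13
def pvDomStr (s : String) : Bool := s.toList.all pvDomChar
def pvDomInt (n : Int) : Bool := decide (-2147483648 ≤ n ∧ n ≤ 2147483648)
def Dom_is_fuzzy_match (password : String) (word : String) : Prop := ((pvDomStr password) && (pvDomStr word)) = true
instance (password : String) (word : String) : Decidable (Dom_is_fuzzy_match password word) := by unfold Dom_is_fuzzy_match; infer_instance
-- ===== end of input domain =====

-- B replaces A's eight sequential full-string replace passes with one per-character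
-- pass through the leet table (objective: idiomatic single traversal).


-- ===== PORT A =====
-- the dict literal leet_subs (insertion order)
def leetSubsA : PySem.Dict String String :=
  PySem.Dict.ofList [("4", "a"), ("@", "a"), ("$", "s"), ("5", "s"),
                     ("0", "o"), ("1", "l"), ("!", "i"), ("3", "e")]

def is_fuzzy_match (password : String) (word : String) : Bool :=
  let password := PySem.Str.lower password
  let word := PySem.Str.lower word
  -- for leet, char in leet_subs.items(): password = password.replace(leet, char)
  let password := leetSubsA.items.foldl (fun p kv => PySem.Str.replace p kv.1 kv.2) password
  password == word

-- ===== PORT B =====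
-- B keys the table by character and maps each character through it once.
def leetSubsB : PySem.Dict Char Char :=
  PySem.Dict.ofList [('4', 'a'), ('@', 'a'), ('$', 's'), ('5', 's'),
                     ('0', 'o'), ('1', 'l'), ('!', 'i'), ('3', 'e')]

def is_fuzzy_match_alt (password : String) (word : String) : Bool :=
  String.ofList ((PySem.Str.lower password).toList.map (fun c => leetSubsB.getD c c))
    == PySem.Str.lower word

-- ===== PRECONDITION & SPEC =====
def Spec_is_fuzzy_match (password : String) (word : String) (out : Bool) : Prop := out = is_fuzzy_match_alt password word
instance (password : String) (word : String) (out : Bool) : Decidable (Spec_is_fuzzy_match password word out) := by unfold Spec_is_fuzzy_match; infer_instance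

-- ===== CLAIM (what is proved, stated in full; the proofs are below) =====
def Claim_equal_is_fuzzy_match : Prop := ∀ (password : String) (word : String), Dom_is_fuzzy_match password word → Spec_is_fuzzy_match password word (is_fuzzy_match password word)

-- ===== LEMMAS AND PROOFS =====

-- one single-character substitution, named to keep proof terms small
def leetStep (a b c : Char) : Char := if c = a then b else c

-- replace with a single-character pattern and single-character replacement is a map
theorem replace_go_single (a b : Char) :
    ∀ (l acc : List Char) (fuel : Nat), l.length ≤ fuel →
      PySem.Chars.replace.go [a] [b] fuel l acc
        = acc.reverse ++ l.map (leetStep a b) := by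
  intro l
  induction l with
  | nil =>
      intro acc fuel _
      cases fuel <;> simp [PySem.Chars.replace.go]
  | cons c t ih =>
      intro acc fuel h
      cases fuel with
      | zero => simp at h
      | succ n =>
        simp only [List.length_cons, Nat.succ_le_succ_iff] at h
        by_cases hc : c = a
        · subst hc
          have hp : List.isPrefixOf [c] (c :: t) = true := by
            simp [List.isPrefixOf]
          simp only [PySem.Chars.replace.go, hp, if_true]
          rw [show List.drop [c].length (c :: t) = t from rfl, ih ([b].reverse ++ acc) n h]
          simp [leetStep]
  -- the last simp closes the head with leetStep c b c = b (if_pos rfl)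
        · have hp : List.isPrefixOf [a] (c :: t) = false := by
            simp only [List.isPrefixOf, Bool.and_true, beq_eq_false_iff_ne, ne_eq]
            exact fun h => hc h.symm
          simp only [PySem.Chars.replace.go, hp, Bool.false_eq_true, if_false]
          rw [ih (c :: acc) n h]
          simp [leetStep, hc]

theorem replace_single (a b : Char) (s : List Char) :
    PySem.Chars.replace s [a] [b] = s.map (leetStep a b) := by
  rw [PySem.Chars.replace]
  simp only [List.isEmpty_cons, Bool.false_eq_true, if_false]
  rw [replace_go_single a b s [] s.length le_rfl]
  simp

-- the eight cascaded single-character substitutions agree with one table lookup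
theorem leet_cascade_eq_lookup (c : Char) :
    leetStep '3' 'e' (leetStep '!' 'i' (leetStep '1' 'l' (leetStep '0' 'o'
      (leetStep '5' 's' (leetStep '$' 's' (leetStep '@' 'a' (leetStep '4' 'a' c)))))))
      = leetSubsB.getD c c := by
  by_cases h4 : c = '4'; · subst h4; decide
  by_cases hAt : c = '@'; · subst hAt; decide
  by_cases hD : c = '$'; · subst hD; decide
  by_cases h5 : c = '5'; · subst h5; decide
  by_cases h0 : c = '0'; · subst h0; decide
  by_cases h1 : c = '1'; · subst h1; decide
  by_cases hB : c = '!'; · subst hB; decide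
  by_cases h3 : c = '3'; · subst h3; decide
  have hi : leetSubsB.items
      = [('4', 'a'), ('@', 'a'), ('$', 's'), ('5', 's'),
         ('0', 'o'), ('1', 'l'), ('!', 'i'), ('3', 'e')] := by decide
  have e4 : ('4' == c) = false := by simp; exact fun h => h4 h.symm
  have eAt : ('@' == c) = false := by simp; exact fun h => hAt h.symm
  have eD : ('$' == c) = false := by simp; exact fun h => hD h.symm
  have e5 : ('5' == c) = false := by simp; exact fun h => h5 h.symm
  have e0 : ('0' == c) = false := by simp; exact fun h => h0 h.symm
  have e1 : ('1' == c) = false := by simp; exact fun h => h1 h.symm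
  have eB : ('!' == c) = false := by simp; exact fun h => hB h.symm
  have e3 : ('3' == c) = false := by simp; exact fun h => h3 h.symm
  simp [leetStep, h4, hAt, hD, h5, h0, h1, hB, h3,
    PySem.Dict.getD, PySem.Dict.get?, hi, List.find?,
    e4, eAt, eD, e5, e0, e1, eB, e3]

-- the full replace chain, at the character-list level
theorem chain_eq_map (L : List Char) :
    PySem.Chars.replace (PySem.Chars.replace (PySem.Chars.replace (PySem.Chars.replace
      (PySem.Chars.replace (PySem.Chars.replace (PySem.Chars.replace (PySem.Chars.replace
        L ['4'] ['a']) ['@'] ['a']) ['$'] ['s']) ['5'] ['s']) ['0'] ['o']) ['1'] ['l'])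
        ['!'] ['i']) ['3'] ['e']
      = L.map (fun c => leetSubsB.getD c c) := by
  rw [replace_single '4' 'a' L, replace_single '@' 'a' _, replace_single '$' 's' _,
    replace_single '5' 's' _, replace_single '0' 'o' _, replace_single '1' 'l' _,
    replace_single '!' 'i' _, replace_single '3' 'e' _]
  induction L with
  | nil => rfl
  | cons c t ih =>
      simp only [List.map_cons]
      rw [ih, leet_cascade_eq_lookup c]

-- ===== VERDICT (by name: the statement is the Claim_ definition above) =====
theorem is_fuzzy_match_spec : Claim_equal_is_fuzzy_match := by
  intro p w _
  unfold Spec_is_fuzzy_match is_fuzzy_match is_fuzzy_match_alt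
  have hitems : leetSubsA.items
      = [("4", "a"), ("@", "a"), ("$", "s"), ("5", "s"),
         ("0", "o"), ("1", "l"), ("!", "i"), ("3", "e")] := by decide
  rw [hitems]
  simp only [List.foldl]
  have hx : PySem.Str.replace (PySem.Str.replace (PySem.Str.replace (PySem.Str.replace
        (PySem.Str.replace (PySem.Str.replace (PySem.Str.replace (PySem.Str.replace
          (PySem.Str.lower p) "4" "a") "@" "a") "$" "s") "5" "s") "0" "o") "1" "l") "!" "i") "3" "e"
      = String.ofList ((PySem.Str.lower p).toList.map (fun c => leetSubsB.getD c c)) := by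
    rw [← String.toList_inj]
    simp only [PySem.Str.toList_replace, String.toList_ofList]
    exact chain_eq_map (PySem.Str.lower p).toList
  rw [hx]
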